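-- pv_equiv track=rewrite | github.com/OTOYO1020/ChatDev_Intermediate | WareHouse/FD_214__20250518035058/string_counter.py | count_possible_strings
-- ===== SOURCE A (Python) =====
-- def count_possible_strings(S: str, marked_chars: set) -> int:
--     MODULO = 10**9 + 7
--     marked_indices = [i for i, char in enumerate(S) if char in marked_chars]
--     m = len(marked_indices)
--     if m == 0:
--         return 0
--     dp = [0] * (m + 1)
--     dp[0] = 1  # Base case: one way to form an empty string
--     for i in range(1, m + 1):
--         dp[i] = dp[i - 1]  # Not choosing the current marked character
--         # Check if the current marked character can be chosen (not adjacent)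
--         if i > 1 and marked_indices[i - 1] - marked_indices[i - 2] > 1:
--             dp[i] += dp[i - 1]  # Choosing the current marked character
--         dp[i] += dp[i - 1]  # Also add the case where the previous marked character is not chosen
--         dp[i] %= MODULO
--     return (dp[m] - 1) % MODULO  # Subtract 1 to exclude the empty string
-- ===== SOURCE B (Python) =====
-- def count_possible_strings(S: str, marked_chars: set) -> int:
--     MODULO = 10**9 + 7
--     idx = [i for i, char in enumerate(S) if char in marked_chars]
--     if not idx:
--         return 0
--     nonadj = sum(1 for a, b in zip(idx, idx[1:]) if b - a > 1)
--     adj = len(idx) - 1 - nonadj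
--     return (pow(2, 1 + adj, MODULO) * pow(3, nonadj, MODULO) - 1) % MODULO
-- ===== Notes on version B (the rewrite author's own statement) =====
-- stated objective: alternative
-- what changed: Replaced the per-position DP recurrence with a closed form: count the nonadjacent consecutive marked pairs in one pass and return (2^(1+adjacent)*3^(nonadjacent)-1) mod 1e9+7 via modular exponentiation, no DP table and no per-step multiply-accumulate loop.
import Mathlib
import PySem

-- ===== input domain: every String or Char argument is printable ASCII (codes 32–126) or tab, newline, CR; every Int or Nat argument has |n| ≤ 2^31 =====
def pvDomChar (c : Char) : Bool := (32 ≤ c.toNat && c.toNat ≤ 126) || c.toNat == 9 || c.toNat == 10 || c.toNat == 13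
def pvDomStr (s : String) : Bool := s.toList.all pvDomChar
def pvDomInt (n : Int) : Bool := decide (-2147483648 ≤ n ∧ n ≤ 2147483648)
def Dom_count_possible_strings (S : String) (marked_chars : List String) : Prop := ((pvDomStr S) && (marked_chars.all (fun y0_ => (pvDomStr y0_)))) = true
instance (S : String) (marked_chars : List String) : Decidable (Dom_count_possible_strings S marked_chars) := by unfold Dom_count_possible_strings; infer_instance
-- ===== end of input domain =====

-- B replaces A's per-position DP table with a closed form: count the nonadjacent consecutive
-- marked pairs and return (2^(1+adjacent)*3^(nonadjacent)-1) mod 1e9+7 (alternative decomposition).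

-- ===== PORT A =====
-- loop body of A's 'for i in range(1, m+1)': each Python statement mutating dp is one pySetD
def pvBodyA (marked_indices : List Int) (dp : List Int) (i : Int) : List Int :=
  let dp := PySem.List.pySetD dp i (PySem.List.pyGetD dp (i - 1) 0)
  let dp := if 1 < i ∧ 1 < PySem.List.pyGetD marked_indices (i - 1) 0 - PySem.List.pyGetD marked_indices (i - 2) 0 then
      PySem.List.pySetD dp i (PySem.List.pyGetD dp i 0 + PySem.List.pyGetD dp (i - 1) 0)
    else dp
  let dp := PySem.List.pySetD dp i (PySem.List.pyGetD dp i 0 + PySem.List.pyGetD dp (i - 1) 0)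
  PySem.List.pySetD dp i (PySem.Int.mod (PySem.List.pyGetD dp i 0) (10 ^ 9 + 7))

def count_possible_strings (S : String) (marked_chars : List String) : Int :=
  let MODULO : Int := 10 ^ 9 + 7
  let marked_indices : List Int :=
    (PySem.List.enumerate S.toList 0).filterMap
      (fun p => if marked_chars.contains (String.ofList [p.2]) then some p.1 else none)
  let m : Int := PySem.List.len marked_indices
  if m = 0 then 0
  else
    let dp : List Int := List.replicate (marked_indices.length + 1) 0
    let dp := PySem.List.pySetD dp 0 1
    let dp := (PySem.List.pyRange 1 (m + 1) 1).foldl (pvBodyA marked_indices) dp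
    PySem.Int.mod (PySem.List.pyGetD dp m 0 - 1) MODULO

-- ===== PORT B =====
-- python's pow(x, e, MODULO) is ported as x ^ e followed by PySem.Int.mod (exact for e ≥ 0, MODULO > 0)
def count_possible_strings_alt (S : String) (marked_chars : List String) : Int :=
  let MODULO : Int := 10 ^ 9 + 7
  let idx : List Int :=
    (PySem.List.enumerate S.toList 0).filterMap
      (fun p => if marked_chars.contains (String.ofList [p.2]) then some p.1 else none)
  if idx = [] then 0
  else
    let nonadj : Int := ((idx.zip (idx.drop 1)).filter (fun p => decide (p.2 - p.1 > 1))).length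
    let adj : Int := PySem.List.len idx - 1 - nonadj
    PySem.Int.mod (PySem.Int.mod ((2 : Int) ^ (1 + adj).toNat) MODULO *
      PySem.Int.mod ((3 : Int) ^ nonadj.toNat) MODULO - 1) MODULO

-- ===== PRECONDITION & SPEC =====
def Spec_count_possible_strings (S : String) (marked_chars : List String) (out : Int) : Prop := out = count_possible_strings_alt S marked_chars
instance (S : String) (marked_chars : List String) (out : Int) : Decidable (Spec_count_possible_strings S marked_chars out) := by unfold Spec_count_possible_strings; infer_instance

-- ===== CLAIM (what is proved, stated in full; the proofs are below) =====
def Claim_equal_count_possible_strings : Prop := ∀ (S : String) (marked_chars : List String), Dom_count_possible_strings S marked_chars → Spec_count_possible_strings S marked_chars (count_possible_strings S marked_chars)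

-- ===== LEMMAS AND PROOFS =====

-- proof-side model of A's whole loop: one pvStep per marked index
def pvStep (st : Option Int × Int) (x : Int) : Option Int × Int :=
  (some x,
   PySem.Int.mod (st.2 * (match st.1 with
      | some prev => if x - prev > 1 then (3 : Int) else 2
      | none => 2)) (10 ^ 9 + 7))

-- the product of per-pair factors starting from a previous index
def pvF (prev : Int) : List Int → Int
  | [] => 1
  | x :: xs => (if x - prev > 1 then 3 else 2) * pvF x xs

-- the number of nonadjacent consecutive pairs, as B counts them
def pvN (prev : Int) (rest : List Int) : Nat :=
  (((prev :: rest).zip rest).filter (fun p => decide (p.2 - p.1 > 1))).length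

theorem pvN_le (prev : Int) (rest : List Int) : pvN prev rest ≤ rest.length := by
  calc pvN prev rest ≤ ((prev :: rest).zip rest).length := List.length_filter_le _ _
    _ ≤ rest.length := by simp [List.length_zip]

theorem pvN_cons (prev x : Int) (xs : List Int) :
    pvN prev (x :: xs) = (if x - prev > 1 then 1 else 0) + pvN x xs := by
  unfold pvN
  by_cases h : x - prev > 1
  · simp [List.zip, h]; omega
  · simp [List.zip, h]

theorem pvF_closed (prev : Int) (rest : List Int) :
    pvF prev rest = 2 ^ (rest.length - pvN prev rest) * 3 ^ (pvN prev rest) := by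
  induction rest generalizing prev with
  | nil => simp [pvF, pvN]
  | cons x xs ih =>
    have hle := pvN_le x xs
    rw [pvF, ih, pvN_cons]
    by_cases h : x - prev > 1
    · simp only [if_pos h, List.length_cons]
      have e : xs.length + 1 - (1 + pvN x xs) = xs.length - pvN x xs := by omega
      rw [e, pow_add, pow_one]
      ring
    · simp only [if_neg h, List.length_cons]
      have e : xs.length + 1 - (0 + pvN x xs) = (xs.length - pvN x xs) + 1 := by omega
      rw [e, pow_succ, Nat.zero_add]
      ring

theorem pv_fold_mod (rest : List Int) :
    ∀ (prev c : Int),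
      (rest.foldl pvStep (some prev, PySem.Int.mod c (10 ^ 9 + 7))).2
        = PySem.Int.mod (c * pvF prev rest) (10 ^ 9 + 7) := by
  have hM : (0 : Int) < 10 ^ 9 + 7 := by norm_num
  induction rest with
  | nil => intro prev c; simp [pvF]
  | cons x xs ih =>
    intro prev c
    have emod : ∀ a : Int, PySem.Int.mod a (10 ^ 9 + 7) = a % (10 ^ 9 + 7) :=
      fun a => PySem.Int.mod_eq_emod_of_pos (a := a) hM
    have hstep : pvStep (some prev, PySem.Int.mod c (10 ^ 9 + 7)) x
        = (some x, PySem.Int.mod (c * (if x - prev > 1 then (3 : Int) else 2)) (10 ^ 9 + 7)) := by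
      simp only [pvStep, emod]
      rw [Int.mul_emod, Int.emod_emod_of_dvd _ dvd_rfl, ← Int.mul_emod]
    rw [List.foldl_cons, hstep, ih x (c * (if x - prev > 1 then (3 : Int) else 2))]
    rw [pvF]
    congr 1
    ring

-- one application of A's loop body at i = k+1 multiplies dp[k] by 2 or 3 (mod M) into dp[k+1]
theorem pvBodyA_step (mi dp : List Int) (k : Nat) (hk : k < mi.length) (hlen : dp.length = mi.length + 1) :
    (pvBodyA mi dp ((k : Int) + 1)).length = mi.length + 1 ∧
    PySem.List.pyGetD (pvBodyA mi dp ((k : Int) + 1)) ((k : Int) + 1) 0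
      = PySem.Int.mod ((PySem.List.pyGetD dp (k : Int) 0) *
          (if 0 < k ∧ 1 < mi.getD k 0 - mi.getD (k-1) 0 then 3 else 2)) (10 ^ 9 + 7) := by
  have e1 : ((k:Int)+1) - 1 = (k:Int) := by ring
  have etn : ((k:Int)+1).toNat = k + 1 := by omega
  have hset : ∀ (l : List Int) (v : Int), PySem.List.pySetD l ((k:Int)+1) v = l.set (k+1) v := by
    intro l v
    rw [PySem.List.pySetD_of_nonneg l v (by omega), etn]
  have hget : ∀ (l : List Int) (d : Int), PySem.List.pyGetD l ((k:Int)+1) d = l.getD (k+1) d := by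
    intro l d
    have h : ((k:Int)+1) = ((k+1 : Nat) : Int) := by push_cast; ring
    rw [h, PySem.List.pyGetD_natCast]
  have hcond : (1 < (k:Int) + 1 ∧ 1 < mi.getD k 0 - PySem.List.pyGetD mi ((k:Int)+1-2) 0)
      ↔ (0 < k ∧ 1 < mi.getD k 0 - mi.getD (k-1) 0) := by
    constructor
    · rintro ⟨h1, h2⟩
      have e2 : ((k:Int)+1) - 2 = ((k-1 : Nat) : Int) := by omega
      rw [e2, PySem.List.pyGetD_natCast] at h2
      exact ⟨by omega, h2⟩
    · rintro ⟨h1, h2⟩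
      have e2 : ((k:Int)+1) - 2 = ((k-1 : Nat) : Int) := by omega
      rw [e2, PySem.List.pyGetD_natCast]
      exact ⟨by omega, h2⟩
  simp only [pvBodyA, e1, hset, hget, PySem.List.pyGetD_natCast]
  rw [if_congr hcond rfl rfl]
  have hL : k + 1 < dp.length := by omega
  by_cases hc : 0 < k ∧ 1 < mi.getD k 0 - mi.getD (k-1) 0
  · simp only [if_pos hc]
    refine ⟨by simp [hlen], ?_⟩
    simp [hL]
    congr 1
    ring
  · simp only [if_neg hc]
    refine ⟨by simp [hlen], ?_⟩
    simp [hL]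
    congr 1
    ring

-- the first component of the pvStep fold is the last marked index seen so far
theorem pv_fst_foldl_step :
    ∀ (l : List Int) (st : Option Int × Int),
      (l.foldl pvStep st).1 = (match l.getLast? with | some x => some x | none => st.1) := by
  intro l
  induction l with
  | nil => intro st; rfl
  | cons a l ih =>
    intro st
    cases l with
    | nil => rfl
    | cons b l' => simpa using ih (pvStep st a)

-- A's dp loop computes, at index k, the running count of pvStep over the first k marked indices
theorem pvA_inv (mi : List Int) :
    ∀ (k : Nat), k ≤ mi.length →
      ((PySem.List.pyRange 1 ((k : Int) + 1) 1).foldl (pvBodyA mi)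
          (PySem.List.pySetD (List.replicate (mi.length + 1) (0 : Int)) 0 1)).length = mi.length + 1
      ∧ PySem.List.pyGetD
          ((PySem.List.pyRange 1 ((k : Int) + 1) 1).foldl (pvBodyA mi)
            (PySem.List.pySetD (List.replicate (mi.length + 1) (0 : Int)) 0 1)) (k : Int) 0
          = ((mi.take k).foldl pvStep (none, 1)).2 := by
  have hdp0 : PySem.List.pySetD (List.replicate (mi.length + 1) (0 : Int)) 0 1
      = 1 :: List.replicate mi.length 0 := by
    rw [PySem.List.pySetD_of_nonneg _ _ (by omega)]
    simp [List.replicate_succ]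
  intro k
  induction k with
  | zero =>
    intro _
    rw [hdp0]
    constructor
    · simp [PySem.List.pyRange_one_eq_nil]
    · simp [PySem.List.pyRange_one_eq_nil]
  | succ k ih =>
    intro hk
    have hklt : k < mi.length := hk
    obtain ⟨hlen, hval⟩ := ih (Nat.le_of_succ_le hk)
    have hsplit : PySem.List.pyRange 1 (((k + 1 : Nat) : Int) + 1) 1
        = PySem.List.pyRange 1 ((k : Int) + 1) 1 ++ [((k : Int) + 1)] := by
      have h := PySem.List.pyRange_one_succ_right (a := 1) (b := (k : Int) + 1) (by omega)
      push_cast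
      exact h
    rw [hsplit, List.foldl_append, List.foldl_cons, List.foldl_nil]
    set dpk := (PySem.List.pyRange 1 ((k : Int) + 1) 1).foldl (pvBodyA mi)
        (PySem.List.pySetD (List.replicate (mi.length + 1) (0 : Int)) 0 1) with hdpk
    obtain ⟨hlen', hval'⟩ := pvBodyA_step mi dpk k hklt hlen
    have hcast : ((k + 1 : Nat) : Int) = (k : Int) + 1 := by push_cast; ring
    rw [hcast]
    refine ⟨hlen', ?_⟩
    rw [hval', hval]
    have htake : mi.take (k+1) = mi.take k ++ [mi[k]] := by
      rw [List.take_add_one]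
      simp [List.getElem?_eq_getElem hklt]
    rw [htake, List.foldl_append, List.foldl_cons, List.foldl_nil]
    have hfst : ((mi.take k).foldl pvStep (none, 1)).1
        = (match (mi.take k).getLast? with | some x => some x | none => (none : Option Int)) :=
      pv_fst_foldl_step (mi.take k) (none, 1)
    cases k with
    | zero =>
      rw [pvStep, hfst]
      simp
    | succ j =>
      have hj : j < mi.length := by omega
      have htk : mi.take (j+1) = mi.take j ++ [mi[j]] := by
        rw [List.take_add_one]
        simp [List.getElem?_eq_getElem hj]
      have hlast : (mi.take (j+1)).getLast? = some mi[j] := by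
        rw [htk, List.getLast?_concat]
      rw [pvStep, hfst, hlast]
      have hgk : mi.getD (j+1) 0 = mi[j+1] := List.getD_eq_getElem mi 0 hklt
      have hgk1 : mi.getD (j+1-1) 0 = mi[j] := by
        simp only [Nat.add_sub_cancel]
        exact List.getD_eq_getElem mi 0 hj
      by_cases hgap : 1 < mi[j+1] - mi[j]
      · rw [if_pos ⟨by omega, by rw [hgk, hgk1]; exact hgap⟩]
        simp [hgap, mul_comm]
      · rw [if_neg (by rw [hgk, hgk1]; tauto)]
        simp [hgap, mul_comm]

theorem count_possible_strings_spec : Claim_equal_count_possible_strings := by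
  unfold Claim_equal_count_possible_strings
  intro S marked_chars _
  unfold Spec_count_possible_strings
  show count_possible_strings S marked_chars = count_possible_strings_alt S marked_chars
  simp only [count_possible_strings, count_possible_strings_alt]
  set mi : List Int := (PySem.List.enumerate S.toList 0).filterMap
      (fun p => if marked_chars.contains (String.ofList [p.2]) then some p.1 else none) with hmi
  by_cases hnil : mi = []
  · simp [hnil, PySem.List.len_eq]
  · have hlen0 : PySem.List.len mi = (mi.length : Int) := by simp [PySem.List.len_eq]
    have hne : ¬ (PySem.List.len mi = 0) := by
      rw [hlen0]
      simpa using fun h => hnil (List.length_eq_zero_iff.mp h)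
    rw [if_neg hne, if_neg hnil, hlen0]
    obtain ⟨_, hval⟩ := pvA_inv mi mi.length le_rfl
    rw [List.take_length] at hval
    rw [hval]
    obtain ⟨x, xs, hxxs⟩ := List.exists_cons_of_ne_nil hnil
    clear_value mi
    subst hxxs
    -- A's fold value in closed form
    have hM : (0 : Int) < 10 ^ 9 + 7 := by norm_num
    have emod : ∀ a : Int, PySem.Int.mod a (10 ^ 9 + 7) = a % (10 ^ 9 + 7) :=
      fun a => PySem.Int.mod_eq_emod_of_pos (a := a) hM
    have h1 : pvStep (none, 1) x = (some x, PySem.Int.mod 2 (10 ^ 9 + 7)) := by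
      simp [pvStep]
    have hfold : ((x :: xs).foldl pvStep (none, 1)).2
        = PySem.Int.mod (2 * pvF x xs) (10 ^ 9 + 7) := by
      rw [List.foldl_cons, h1, pv_fold_mod xs x 2]
    rw [hfold, pvF_closed]
    -- B's exponents
    have hle := pvN_le x xs
    have hzip : (x :: xs).zip ((x :: xs).drop 1) = (x :: xs).zip xs := by simp
    have hcount : (((x :: xs).zip ((x :: xs).drop 1)).filter
        (fun p => decide (p.2 - p.1 > 1))).length = pvN x xs := by
      rw [hzip]; rfl
    rw [hcount]
    have hlc : (x :: xs).length = xs.length + 1 := rfl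
    have htn1 : ((1 : Int) + ((((x :: xs).length : Nat) : Int) - 1 - ((pvN x xs : Nat) : Int))).toNat
        = (xs.length - pvN x xs) + 1 := by
      rw [hlc]; push_cast; omega
    have htn2 : (((pvN x xs : Nat) : Int)).toNat = pvN x xs := by omega
    rw [htn1, htn2]
    -- arithmetic: mod (mod (2 * 2^a * 3^b) - 1) = mod (mod (2^(a+1)) * mod (3^b) - 1)
    simp only [emod]
    have hpow : (2 : Int) * (2 ^ (xs.length - pvN x xs) * 3 ^ (pvN x xs))
        = 2 ^ ((xs.length - pvN x xs) + 1) * 3 ^ (pvN x xs) := by ring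
    rw [hpow]
    conv_rhs => rw [Int.sub_emod, Int.mul_emod, Int.emod_emod_of_dvd _ dvd_rfl,
      Int.emod_emod_of_dvd _ dvd_rfl, ← Int.mul_emod, ← Int.sub_emod]
    conv_lhs => rw [Int.sub_emod, Int.emod_emod_of_dvd _ dvd_rfl, ← Int.sub_emod]
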